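-- pv_equiv track=rewrite | github.com/Pkuzc12/Computational-Physics-Assignments | HW4/HW4_计物第三题.py | EqnGrt
-- ===== SOURCE A (Python) =====
-- def Kronecker(x, y): #克罗内科符号
--     if x == y:
--         return 1
--     else:
--         return 0
--
-- def EqnGrt(n): #方程组生成
--     result = []
--     for i in range(0, n):
--         temp = []
--         for j in range(0, n):
--             temp = temp+[-Kronecker(i-1, j)-Kronecker(i+1, j)+2*Kronecker(i, j)]
--         result = result+[temp]
--     return result
-- ===== SOURCE B (Python) =====
-- def EqnGrt(n):
--     result = []
--     for i in range(n):
--         row = [0] * n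
--         row[i] = 2
--         if i - 1 >= 0:
--             row[i - 1] = -1
--         if i + 1 <= n - 1:
--             row[i + 1] = -1
--         result.append(row)
--     return result
-- ===== Notes on version B (the rewrite author's own statement) =====
-- stated objective: faster
-- what changed: Replaces the per-cell Kronecker-delta formula evaluated in a nested loop with quadratic list-rebuilding appends by direct band assignment: each row starts as a preallocated zero vector and only the three band positions are set.
import Mathlib
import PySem

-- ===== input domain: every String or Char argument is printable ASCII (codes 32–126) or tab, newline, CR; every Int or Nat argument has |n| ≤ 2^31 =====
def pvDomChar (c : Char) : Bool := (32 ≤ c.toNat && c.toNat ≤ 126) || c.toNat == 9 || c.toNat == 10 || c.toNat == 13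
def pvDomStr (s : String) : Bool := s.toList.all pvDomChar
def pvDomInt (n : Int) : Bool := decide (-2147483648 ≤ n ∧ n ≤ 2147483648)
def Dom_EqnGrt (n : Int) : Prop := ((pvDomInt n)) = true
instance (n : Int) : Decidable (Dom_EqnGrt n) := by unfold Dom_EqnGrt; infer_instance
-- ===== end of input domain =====

-- B builds each row by band assignment on a zero vector instead of evaluating a Kronecker-delta
-- formula at every cell (objective: simpler).

-- ===== PORT A =====
def Kron (x y : Int) : Int := if x = y then 1 else 0

def EqnGrt (n : Int) : List (List Int) :=
  (PySem.List.pyRange 0 n 1).foldl (fun result i =>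
    result ++ [(PySem.List.pyRange 0 n 1).foldl
      (fun temp j => temp ++ [-Kron (i-1) j - Kron (i+1) j + 2 * Kron i j]) []]) []

-- ===== PORT B =====
-- row[i] = 2 etc.: indices are nonnegative and < n here, so List.set at .toNat is exact.
def EqnGrt_alt (n : Int) : List (List Int) :=
  (PySem.List.pyRange 0 n 1).foldl (fun result i =>
    let row := List.replicate n.toNat 0
    let row := row.set i.toNat 2
    let row := if 0 ≤ i - 1 then row.set (i - 1).toNat (-1) else row
    let row := if i + 1 ≤ n - 1 then row.set (i + 1).toNat (-1) else row
    result ++ [row]) []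

-- ===== PRECONDITION & SPEC =====
def Spec_EqnGrt (n : Int) (out : List (List Int)) : Prop := out = EqnGrt_alt n
instance (n : Int) (out : List (List Int)) : Decidable (Spec_EqnGrt n out) := by unfold Spec_EqnGrt; infer_instance

-- ===== CLAIM (what is proved, stated in full; the proofs are below) =====
def Claim_equal_EqnGrt : Prop := ∀ (n : Int), Dom_EqnGrt n → Spec_EqnGrt n (EqnGrt n)

-- ===== LEMMAS AND PROOFS =====

lemma row_eq (n i : Int) (h0 : 0 ≤ i) (h1 : i < n) :
    (PySem.List.pyRange 0 n 1).foldl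
      (fun temp j => temp ++ [-Kron (i-1) j - Kron (i+1) j + 2 * Kron i j]) []
    = (let row := List.replicate n.toNat 0
       let row := row.set i.toNat 2
       let row := if 0 ≤ i - 1 then row.set (i - 1).toNat (-1) else row
       if i + 1 ≤ n - 1 then row.set (i + 1).toNat (-1) else row) := by
  rw [PySem.List.foldl_append_singleton_eq_map, List.nil_append,
      PySem.List.pyRange_one]
  simp only [Int.sub_zero, List.map_map]
  apply List.ext_getElem
  · simp; split_ifs <;> simp
  · intro k hk1 hk2
    simp only [List.getElem_map, List.getElem_range, Function.comp]
    have hk : k < n.toNat := by simpa using hk1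
    split_ifs with hA hB hB <;>
      simp only [List.getElem_set, List.getElem_replicate, Kron] <;>
      split_ifs <;> omega

theorem EqnGrt_spec : Claim_equal_EqnGrt := by
  intro n _
  unfold Spec_EqnGrt EqnGrt EqnGrt_alt
  rw [PySem.List.foldl_append_singleton_eq_map, PySem.List.foldl_append_singleton_eq_map,
      List.nil_append, List.nil_append]
  apply List.map_congr_left
  intro i hi
  rw [PySem.List.mem_pyRange_one] at hi
  exact row_eq n i hi.1 hi.2
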